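-- pv_equiv track=rewrite | github.com/TheAnsarya/ffmq-info | tools/analysis/character_encoding_verifier.py | find_unmapped_ranges
-- ===== SOURCE A (Python) =====
-- from typing import Dict, List, Tuple, Set, Optional, Any
--
-- def find_unmapped_ranges(mapped_bytes: Set[int]) -> List[Tuple[int, int]]:
-- 	"""
-- 	Find contiguous unmapped byte ranges.
--
-- 	Args:
-- 		mapped_bytes: Set of mapped byte values
--
-- 	Returns:
-- 		List of (start, end) tuples for unmapped ranges
-- 	"""
-- 	if not mapped_bytes:
-- 		return [(0, 255)]
--
-- 	unmapped = []
-- 	range_start = None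
--
-- 	for byte_val in range(256):
-- 		if byte_val not in mapped_bytes:
-- 			if range_start is None:
-- 				range_start = byte_val
-- 		else:
-- 			if range_start is not None:
-- 				unmapped.append((range_start, byte_val - 1))
-- 				range_start = None
--
-- 	# Close final range if needed
-- 	if range_start is not None:
-- 		unmapped.append((range_start, 255))
--
-- 	return unmapped
-- ===== SOURCE B (Python) =====
-- def find_unmapped_ranges(mapped_bytes):
-- 	"""Find contiguous unmapped byte ranges as (start, end) tuples."""
-- 	unmapped = [b for b in range(256) if b not in mapped_bytes]
-- 	out = []
-- 	for b in unmapped: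
-- 		if out and out[-1][1] == b - 1:
-- 			out[-1] = (out[-1][0], b)
-- 		else:
-- 			out.append((b, b))
-- 	return out
-- ===== Notes on version B (the rewrite author's own statement) =====
-- stated objective: simpler
-- what changed: B replaces A's sentinel state machine (range_start tracking, empty-set special case, final-range close) with a single uniform pass: build the list of unmapped bytes, then merge each byte into the output by extending the last range when contiguous, which handles empty and trailing ranges with no special cases.
import Mathlib
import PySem

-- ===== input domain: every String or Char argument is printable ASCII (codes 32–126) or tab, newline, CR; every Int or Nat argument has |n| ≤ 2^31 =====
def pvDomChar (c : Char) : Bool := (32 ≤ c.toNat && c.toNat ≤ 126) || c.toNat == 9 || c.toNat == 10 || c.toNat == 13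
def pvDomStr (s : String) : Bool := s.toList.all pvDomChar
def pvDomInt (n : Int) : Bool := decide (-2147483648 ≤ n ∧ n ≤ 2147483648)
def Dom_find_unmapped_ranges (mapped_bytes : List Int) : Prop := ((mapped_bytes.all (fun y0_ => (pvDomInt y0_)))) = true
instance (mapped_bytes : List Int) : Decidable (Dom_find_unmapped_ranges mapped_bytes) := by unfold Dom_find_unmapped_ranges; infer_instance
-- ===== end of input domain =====

-- B is simpler: one uniform merge pass over the list of unmapped bytes (extend the
-- last range when contiguous, else start a new one) instead of A's range_start
-- sentinel state machine with an empty-set special case and a final-range close.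

-- ===== PORT A =====
-- loop body of A's `for byte_val in range(256)`; state = (unmapped, range_start)
def stepA (mapped_bytes : List Int) (st : List (Int × Int) × Option Int) (byte_val : Int) :
    List (Int × Int) × Option Int :=
  if ¬ mapped_bytes.contains byte_val then
    match st.2 with
    | none => (st.1, some byte_val)
    | some _ => st
  else
    match st.2 with
    | some rs => (st.1 ++ [(rs, byte_val - 1)], none)
    | none => st

def find_unmapped_ranges (mapped_bytes : List Int) : List (Int × Int) :=
  if mapped_bytes = [] then [(0, 255)]
  else
    let fin := (PySem.List.pyRange 0 256 1).foldl (stepA mapped_bytes) ([], none)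
    match fin.2 with
    | some rs => fin.1 ++ [(rs, 255)]
    | none => fin.1

-- ===== PORT B =====
-- loop body of B's `for b in unmapped` (Python's out[-1] read/write is the
-- getLast?/dropLast-++ pair here; exact for the list built by this loop)
def stepB (out : List (Int × Int)) (b : Int) : List (Int × Int) :=
  match out.getLast? with
  | some (s, e) => if e = b - 1 then out.dropLast ++ [(s, b)] else out ++ [(b, b)]
  | none => [(b, b)]

def find_unmapped_ranges_alt (mapped_bytes : List Int) : List (Int × Int) :=
  ((PySem.List.pyRange 0 256 1).filter (fun b => !(mapped_bytes.contains b))).foldl stepB []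

-- ===== PRECONDITION & SPEC =====
def Spec_find_unmapped_ranges (mapped_bytes : List Int) (out : List (Int × Int)) : Prop := out = find_unmapped_ranges_alt mapped_bytes
instance (mapped_bytes : List Int) (out : List (Int × Int)) : Decidable (Spec_find_unmapped_ranges mapped_bytes out) := by unfold Spec_find_unmapped_ranges; infer_instance

-- ===== CLAIM (what is proved, stated in full; the proofs are below) =====
def Claim_equal_find_unmapped_ranges : Prop := ∀ (mapped_bytes : List Int), Dom_find_unmapped_ranges mapped_bytes → Spec_find_unmapped_ranges mapped_bytes (find_unmapped_ranges mapped_bytes)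

-- ===== LEMMAS AND PROOFS =====

-- Loop invariant tying the two passes together after processing bytes 0..k-1:
-- when A's range_start is `some rs`, B's merged output is A's closed ranges plus
-- the open range (rs, k-1); when it is `none`, the outputs coincide and no range
-- of B's output ends at k-1 (so B will not extend it at byte k).
lemma pv_inv (m : List Int) (k : Nat) :
    (∀ rs, ((PySem.List.pyRange 0 (k : Int) 1).foldl (stepA m) ([], none)).2 = some rs →
      ((PySem.List.pyRange 0 (k : Int) 1).filter (fun b => !(m.contains b))).foldl stepB []
        = ((PySem.List.pyRange 0 (k : Int) 1).foldl (stepA m) ([], none)).1 ++ [(rs, (k : Int) - 1)]) ∧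
    (((PySem.List.pyRange 0 (k : Int) 1).foldl (stepA m) ([], none)).2 = none →
      ((PySem.List.pyRange 0 (k : Int) 1).filter (fun b => !(m.contains b))).foldl stepB []
        = ((PySem.List.pyRange 0 (k : Int) 1).foldl (stepA m) ([], none)).1 ∧
      ∀ s e, (((PySem.List.pyRange 0 (k : Int) 1).filter (fun b => !(m.contains b))).foldl stepB []).getLast? = some (s, e) →
        e < (k : Int) - 1) := by
  
  induction k with
  | zero =>
      simp [PySem.List.pyRange_one_eq_nil (by omega : (0:Int) ≤ 0)]
  | succ k ih =>
      have hsplit : PySem.List.pyRange 0 ((k + 1 : Nat) : Int) 1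
          = PySem.List.pyRange 0 (k : Int) 1 ++ [(k : Int)] := by
        have := PySem.List.pyRange_one_succ_right (a := 0) (b := (k : Int)) (by omega)
        push_cast
        push_cast at this
        exact this
      rw [hsplit, List.filter_append, List.foldl_append, List.foldl_append]
      obtain ⟨ihs, ihn⟩ := ih
      rcases hSA : List.foldl (stepA m) ([], none) (PySem.List.pyRange 0 (k : Int) 1) with ⟨acc, ost⟩
      rw [hSA] at ihs ihn
      generalize hOB : List.foldl stepB [] (List.filter (fun b => !(m.contains b)) (PySem.List.pyRange 0 (k : Int) 1)) = ob at ihs ihn ⊢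
      by_cases hmem : (k : Int) ∈ m
      · -- byte k mapped: filter drops it
        have hf : List.filter (fun b => !(m.contains b)) [(k : Int)] = [] := by simp [hmem]
        rw [hf]
        simp only [List.foldl_nil, List.foldl_cons]
        cases ost with
        | none =>
            obtain ⟨hb, hlast⟩ := ihn rfl
            simp only [stepA, List.contains_eq_mem, hmem, decide_true, not_true_eq_false, ite_false]
            refine ⟨fun rs h => by simp at h, fun _ => ⟨hb, fun s e he => ?_⟩⟩
            have := hlast s e he
            push_cast
            omega
        | some rs =>
            have hb := ihs rs rfl
            simp only [stepA, List.contains_eq_mem, hmem, decide_true, not_true_eq_false, ite_false]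
            refine ⟨fun rs' h => by simp at h, fun _ => ⟨hb, fun s e he => ?_⟩⟩
            rw [hb] at he
            rw [List.getLast?_concat] at he
            cases he
            push_cast
            omega
      · -- byte k unmapped: filter keeps it
        have hf : List.filter (fun b => !(m.contains b)) [(k : Int)] = [(k : Int)] := by simp [hmem]
        rw [hf]
        simp only [List.foldl_cons, List.foldl_nil]
        cases ost with
        | none =>
            obtain ⟨hb, hlast⟩ := ihn rfl
            simp only [stepA, List.contains_eq_mem, hmem, decide_false]
            refine ⟨fun rs h => ?_, fun h => by simp at h⟩
            simp only [Bool.false_eq_true, not_false_eq_true, if_true, Option.some.injEq] at h ⊢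
            subst h
            rcases hob : ob.getLast? with _ | ⟨s, e⟩
            · have hnil : ob = [] := List.getLast?_eq_none_iff.mp hob
              subst hnil
              simp only [stepB, List.getLast?_nil]
              have : acc = [] := hb.symm
              subst this
              norm_num
            · have hne : e ≠ (k : Int) - 1 := by
                have := hlast s e hob
                omega
              simp only [stepB, hob, if_neg hne]
              rw [hb]
              norm_num
        | some rs =>
            have hb := ihs rs rfl
            simp only [stepA, List.contains_eq_mem, hmem, decide_false]
            refine ⟨fun rs' h => ?_, fun h => by simp at h⟩
            simp only [Bool.false_eq_true, not_false_eq_true, if_true, Option.some.injEq] at h ⊢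
            subst h
            subst hb
            simp only [stepB, List.getLast?_concat]
            simp only [List.dropLast_concat]
            norm_num

-- the short-circuited case: A returns [(0,255)] without looping; B computes it
set_option maxRecDepth 20000 in
lemma pv_alt_nil : find_unmapped_ranges_alt [] = [(0, 255)] := by decide

-- ===== VERDICT (by name: the statement is the Claim_ definition above) =====
theorem find_unmapped_ranges_spec : Claim_equal_find_unmapped_ranges := by
  intro m _
  unfold Spec_find_unmapped_ranges
  by_cases hm : m = []
  · subst hm
    simp [find_unmapped_ranges, pv_alt_nil]
  · have h := pv_inv m 256
    push_cast at h
    obtain ⟨hs, hn⟩ := h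
    unfold find_unmapped_ranges find_unmapped_ranges_alt
    simp only [hm, if_false]
    rcases hst : ((PySem.List.pyRange 0 256 1).foldl (stepA m) ([], none)).2 with _ | rs
    · exact ((hn hst).1).symm
    · rw [hs rs hst]
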